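-- pv_equiv track=rewrite | github.com/gxnda/digit_powers | main.py | is_sum_of_digit_powers
-- ===== SOURCE A (Python) =====
-- from itertools import product
--
-- def is_sum_of_digit_powers(n: int) -> tuple[bool, list[int]]:
--     digits = [int(d) for d in str(n)]
--     powers = range(1, len(str(n)) + 1)
--     combinations = product(powers, repeat=len(digits))
--
--     for power_combo in combinations:
--         digit_powers = [d ** p for d, p in zip(digits, power_combo)]
--         if n == sum(digit_powers):
--             return True, digit_powers
--
--     return False, []
-- ===== SOURCE B (Python) =====
-- def is_sum_of_digit_powers(n: int) -> tuple[bool, list[int]]: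
--     digits = [int(d) for d in str(n)]
--     k = len(str(n))
--     # reach[i] = set of sums achievable from digits[i:] (right-to-left DP)
--     reach = [set() for _ in range(len(digits) + 1)]
--     reach[len(digits)] = {0}
--     for i in range(len(digits) - 1, -1, -1):
--         d = digits[i]
--         reach[i] = {d ** p + s for p in range(1, k + 1) for s in reach[i + 1]}
--     if n not in reach[0]:
--         return False, []
--     rem = n
--     result = []
--     for i, d in enumerate(digits):
--         for p in range(1, k + 1):
--             v = d ** p
--             if rem - v in reach[i + 1]:
--                 result.append(v)
--                 rem -= v
--                 break
--     return True, result
-- ===== Notes on version B (the rewrite author's own statement) =====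
-- stated objective: faster
-- what changed: Replaced A's brute-force scan over all k^m power combinations (itertools.product) with a right-to-left reachability DP over digit suffixes plus a greedy left-to-right reconstruction of the lex-first assignment.
import Mathlib
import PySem

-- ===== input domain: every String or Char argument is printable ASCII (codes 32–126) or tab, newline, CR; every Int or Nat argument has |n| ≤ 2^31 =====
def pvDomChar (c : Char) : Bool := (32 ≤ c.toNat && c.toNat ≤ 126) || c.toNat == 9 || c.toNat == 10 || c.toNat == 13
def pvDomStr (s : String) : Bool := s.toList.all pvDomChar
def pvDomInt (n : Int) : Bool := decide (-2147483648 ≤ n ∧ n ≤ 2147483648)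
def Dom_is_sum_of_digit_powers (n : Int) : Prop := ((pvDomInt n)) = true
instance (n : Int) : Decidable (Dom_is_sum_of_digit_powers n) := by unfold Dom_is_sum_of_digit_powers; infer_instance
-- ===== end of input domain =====

-- B replaces A's brute-force scan over all k^m power combinations with a right-to-left
-- reachability DP plus a greedy left-to-right reconstruction of the lex-first assignment
-- (objective: faster). Both programs raise ValueError for n < 0 (excluded by Pre_).

-- ===== PORT A =====
-- digits = [int(d) for d in str(n)]  — int('-') raises ValueError for n < 0 (outside Pre_);
--   getD 0 totalizes the never-reached none under Pre_ (each char is then a decimal digit).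
def pvDigits (n : Int) : List Int :=
  (PySem.Int.toChars n).map (fun c => (PySem.Int.ofChars? [c]).getD 0)

-- powers = range(1, len(str(n)) + 1)
def pvPowers (n : Int) : List Int :=
  PySem.List.pyRange 1 ((PySem.Int.toChars n).length + 1) 1

-- itertools.product(powers, repeat=m), lexicographic order
def pvProduct (ps : List Int) : Nat → List (List Int)
  | 0 => [[]]
  | m + 1 => ps.flatMap (fun p => (pvProduct ps m).map (fun c => p :: c))

-- digit_powers = [d ** p for d, p in zip(digits, power_combo)]  (p ≥ 1 always, so toNat is exact)
def pvDigitPowers (digits combo : List Int) : List Int :=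
  (digits.zip combo).map (fun dp => dp.1 ^ dp.2.toNat)

-- the for-loop over combinations with its early return
def pvFind (n : Int) (digits : List Int) : List (List Int) → Bool × List Int
  | [] => (false, [])
  | c :: rest =>
    let dps := pvDigitPowers digits c
    if n = dps.sum then (true, dps) else pvFind n digits rest

def is_sum_of_digit_powers (n : Int) : Bool × List Int :=
  pvFind n (pvDigits n) (pvProduct (pvPowers n) (pvDigits n).length)

-- ===== PORT B =====
-- reach(ds) = set of sums achievable from the digit suffix ds (Source B's reach[i], built right to left;
-- Source B stores the array, the port recomputes the same sets by structural recursion)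
def pvReach (ps : List Int) : List Int → PySem.Set Int
  | [] => PySem.Set.ofList [0]
  | d :: ds =>
    PySem.Set.ofList (ps.flatMap (fun p => (pvReach ps ds).map (fun s => d ^ p.toNat + s)))

-- inner loop: first p in ps with rem - d**p reachable in the suffix; returns v = d**p
def pvPick (d rem : Int) (r : PySem.Set Int) : List Int → Option Int
  | [] => none
  | p :: ps' =>
    let v := d ^ p.toNat
    if rem - v ∈ r then some v else pvPick d rem r ps'

-- the reconstruction loop over enumerate(digits)
def pvGreedy (ps : List Int) : Int → List Int → List Int
  | _, [] => []
  | rem, d :: ds =>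
    match pvPick d rem (pvReach ps ds) ps with
    | some v => v :: pvGreedy ps (rem - v) ds
    | none => pvGreedy ps rem ds

def is_sum_of_digit_powers_alt (n : Int) : Bool × List Int :=
  let digits := pvDigits n
  let ps := pvPowers n
  if n ∈ pvReach ps digits then (true, pvGreedy ps n digits) else (false, [])

-- ===== PRECONDITION & SPEC =====
-- A raises ValueError for n < 0 (int('-') on the sign character of str(n)); Pre_ excludes exactly those.
def Pre_is_sum_of_digit_powers (n : Int) : Prop := 0 ≤ n
instance (n : Int) : Decidable (Pre_is_sum_of_digit_powers n) := by unfold Pre_is_sum_of_digit_powers; infer_instance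
def pvWitness_is_sum_of_digit_powers : Int := 89

def Spec_is_sum_of_digit_powers (n : Int) (out : Bool × List Int) : Prop := out = is_sum_of_digit_powers_alt n
instance (n : Int) (out : Bool × List Int) : Decidable (Spec_is_sum_of_digit_powers n out) := by unfold Spec_is_sum_of_digit_powers; infer_instance

-- ===== CLAIM (what is proved, stated in full; the proofs are below) =====
def Claim_equal_is_sum_of_digit_powers : Prop := ∀ (n : Int), Dom_is_sum_of_digit_powers n → Pre_is_sum_of_digit_powers n → Spec_is_sum_of_digit_powers n (is_sum_of_digit_powers n)

-- ===== LEMMAS AND PROOFS =====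

-- the scan over an appended combination list tries the left part first
theorem pvFind_append (t : Int) (ds : List Int) (L1 L2 : List (List Int)) :
    pvFind t ds (L1 ++ L2) =
      if (pvFind t ds L1).1 then pvFind t ds L1 else pvFind t ds L2 := by
  induction L1 with
  | nil => simp [pvFind]
  | cons c rest ih =>
    by_cases h : t = (pvDigitPowers ds c).sum
    · simp [pvFind, h]
    · simp [pvFind, h, ih]

-- scanning the group of combos starting with power p reduces to scanning for t - d**p on the tail
theorem pvFind_group (t d p : Int) (ds : List Int) (L : List (List Int)) :
    pvFind t (d :: ds) (L.map (fun c => p :: c)) =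
      if (pvFind (t - d ^ p.toNat) ds L).1 then
        (true, d ^ p.toNat :: (pvFind (t - d ^ p.toNat) ds L).2)
      else (false, []) := by
  induction L with
  | nil => simp [pvFind]
  | cons c rest ih =>
    simp only [List.map_cons, pvFind, pvDigitPowers, List.zip_cons_cons, List.map_cons,
      List.sum_cons]
    by_cases h : t - d ^ p.toNat = ((ds.zip c).map (fun dp => dp.1 ^ dp.2.toNat)).sum
    · have h' : t = d ^ p.toNat + ((ds.zip c).map (fun dp => dp.1 ^ dp.2.toNat)).sum := by omega
      simp [h']
    · have h' : ¬ t = d ^ p.toNat + ((ds.zip c).map (fun dp => dp.1 ^ dp.2.toNat)).sum := by omega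
      simp [h, h', ih]

-- membership in the reachability set of a nonempty suffix
theorem mem_pvReach_cons (ps : List Int) (d t : Int) (ds : List Int) :
    t ∈ pvReach ps (d :: ds) ↔ ∃ p ∈ ps, t - d ^ p.toNat ∈ pvReach ps ds := by
  simp only [pvReach, PySem.Set.mem_ofList, List.mem_flatMap, List.mem_map]
  constructor
  · rintro ⟨p, hp, s, hs, rfl⟩
    exact ⟨p, hp, by simpa using hs⟩
  · rintro ⟨p, hp, hs⟩
    exact ⟨p, hp, t - d ^ p.toNat, hs, by omega⟩

theorem pvPick_eq_none_iff (d rem : Int) (r : PySem.Set Int) (ps : List Int) :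
    pvPick d rem r ps = none ↔ ∀ p ∈ ps, rem - d ^ p.toNat ∉ r := by
  induction ps with
  | nil => simp [pvPick]
  | cons p ps' ih =>
    simp only [pvPick]
    split_ifs with h
    · simp [h]
    · simp [ih, h]

-- the heart of the equivalence: A's lex-first scan over all combos equals B's DP + greedy
theorem pvFind_eq_reach (ps : List Int) (ds : List Int) (t : Int) :
    pvFind t ds (pvProduct ps ds.length) =
      if t ∈ pvReach ps ds then (true, pvGreedy ps t ds) else (false, []) := by
  induction ds generalizing t with
  | nil =>
    by_cases h : t = 0 <;>
      simp [pvProduct, pvFind, pvDigitPowers, pvReach, pvGreedy, PySem.Set.ofList, h]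
  | cons d ds ih =>
    -- inner induction over the power list drives the flatMap / pvPick correspondence
    have inner : ∀ qs : List Int,
        pvFind t (d :: ds) (qs.flatMap (fun p => (pvProduct ps ds.length).map (fun c => p :: c))) =
          match pvPick d t (pvReach ps ds) qs with
          | some v => (true, v :: pvGreedy ps (t - v) ds)
          | none => (false, []) := by
      intro qs
      induction qs with
      | nil => simp [pvFind, pvPick]
      | cons p qs' ihq =>
        rw [List.flatMap_cons, pvFind_append, pvFind_group, ih (t - d ^ p.toNat)]
        by_cases h : t - d ^ p.toNat ∈ pvReach ps ds
        · simp [h, pvPick]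
        · simp [h, pvPick, ihq]
    rw [show (d :: ds).length = ds.length + 1 from rfl]
    simp only [pvProduct]
    rw [inner ps]
    by_cases h : t ∈ pvReach ps (d :: ds)
    · obtain ⟨p, hp, hmem⟩ := (mem_pvReach_cons ps d t ds).mp h
      have hnone : pvPick d t (pvReach ps ds) ps ≠ none := fun hn =>
        ((pvPick_eq_none_iff d t (pvReach ps ds) ps).mp hn p hp) hmem
      obtain ⟨v, hv⟩ := Option.ne_none_iff_exists'.mp hnone
      simp [h, hv, pvGreedy]
    · have hnone : pvPick d t (pvReach ps ds) ps = none := by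
        rw [pvPick_eq_none_iff]
        intro p hp hmem
        exact h ((mem_pvReach_cons ps d t ds).mpr ⟨p, hp, hmem⟩)
      simp [h, hnone]

-- ===== VERDICT (by name: the statement is the Claim_ definition above) =====
theorem is_sum_of_digit_powers_spec : Claim_equal_is_sum_of_digit_powers := by
  intro n _ _
  show is_sum_of_digit_powers n = is_sum_of_digit_powers_alt n
  simp only [is_sum_of_digit_powers, is_sum_of_digit_powers_alt]
  exact pvFind_eq_reach (pvPowers n) (pvDigits n) n
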